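-- pv_equiv track=rewrite | github.com/zantryis/NEXUS | src/nexus/engine/synthesis/threads.py | _resolve_transitive_merges
-- ===== SOURCE A (Python) =====
-- def _resolve_transitive_merges(pairs: list[tuple[int, int]]) -> list[tuple[int, int]]:
--     """Resolve transitive chains: if A←B and B←C, return A←B and A←C."""
--     # Build a union-find to collapse chains
--     parent: dict[int, int] = {}
--
--     def find(x: int) -> int:
--         while parent.get(x, x) != x:
--             parent[x] = parent.get(parent[x], parent[x])
--             x = parent[x]
--         return x
--
--     # For each pair, the keep_id is the root
--     keep_sig: dict[int, int] = {}
--     for keep_id, absorb_id in pairs: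
--         keep_sig[keep_id] = keep_sig.get(keep_id, 0)
--         keep_sig[absorb_id] = keep_sig.get(absorb_id, 0)
--         root_keep = find(keep_id)
--         root_absorb = find(absorb_id)
--         if root_keep != root_absorb:
--             # Always make the keep_id the root
--             parent[root_absorb] = root_keep
--
--     # Reconstruct pairs: each non-root points to its root
--     all_ids = set()
--     for k, a in pairs:
--         all_ids.add(k)
--         all_ids.add(a)
--
--     result = []
--     seen_absorb = set()
--     for tid in all_ids:
--         root = find(tid)
--         if tid != root and tid not in seen_absorb:
--             result.append((root, tid))
--             seen_absorb.add(tid)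
--     return result
-- ===== SOURCE B (Python) =====
-- def _resolve_transitive_merges(pairs: list[tuple[int, int]]) -> list[tuple[int, int]]:
--     """Quick-find: keep a flat id->root label map instead of a union-find tree."""
--     label: dict[int, int] = {}
--     for keep_id, absorb_id in pairs:
--         rk = label.get(keep_id, keep_id)
--         ra = label.get(absorb_id, absorb_id)
--         label[keep_id] = rk
--         label[absorb_id] = ra
--         if rk != ra:
--             label = {y: (rk if r == ra else r) for y, r in label.items()}
--
--     all_ids = set()
--     for k, a in pairs:
--         all_ids.add(k)
--         all_ids.add(a)
--
--     return [(label.get(tid, tid), tid) for tid in all_ids if label.get(tid, tid) != tid]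
-- ===== Notes on version B (the rewrite author's own statement) =====
-- stated objective: simpler
-- what changed: Replaces the mutating union-find tree (parent dict with a path-halving find loop called inside every iteration and again during reconstruction) by a flat quick-find label map: one dict lookup per id gives its root directly, and each union relabels the map in a single scan; the reconstruction becomes a plain filter/map comprehension with no find calls and no seen-set.
import Mathlib
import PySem

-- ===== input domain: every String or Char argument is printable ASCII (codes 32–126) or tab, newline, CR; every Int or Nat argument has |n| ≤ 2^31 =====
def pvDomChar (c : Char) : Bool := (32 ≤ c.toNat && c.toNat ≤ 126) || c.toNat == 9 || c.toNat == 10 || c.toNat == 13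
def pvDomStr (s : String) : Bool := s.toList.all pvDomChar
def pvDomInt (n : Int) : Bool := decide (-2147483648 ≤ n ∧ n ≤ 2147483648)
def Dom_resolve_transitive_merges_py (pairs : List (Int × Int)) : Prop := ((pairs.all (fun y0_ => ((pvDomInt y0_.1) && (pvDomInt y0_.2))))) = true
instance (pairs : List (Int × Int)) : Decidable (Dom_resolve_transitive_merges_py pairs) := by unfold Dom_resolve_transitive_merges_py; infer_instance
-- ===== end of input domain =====

-- B replaces A's mutating union-find tree (find with path halving) by a flat quick-find
-- label map relabelled in one scan per union: simpler, no nested find loop. Return values only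
-- (A mutates nothing observable). Output order over Python's hash-ordered set is compared as a set.

-- ===== PORT A =====
-- find(x): 'while parent.get(x,x) != x: parent[x] = parent.get(parent[x], parent[x]); x = parent[x]'.
-- The fuel (p.size + 1) only makes the loop total; the invariant pvInvP proved below shows it is never exhausted.
def pvFindS (p : PySem.Dict Int Int) (x : Int) : Nat → Int × PySem.Dict Int Int
  | 0 => (x, p)
  | fuel+1 =>
    if p.getD x x ≠ x then
      let y := p.getD x x
      let z := p.getD y y
      pvFindS (p.insert x z) z fuel
    else (x, p)

def pvFind (p : PySem.Dict Int Int) (x : Int) : Int × PySem.Dict Int Int :=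
  pvFindS p x (p.size + 1)

-- body of A's 'for keep_id, absorb_id in pairs' loop (state: (parent, keep_sig))
def pvStepA (st : PySem.Dict Int Int × PySem.Dict Int Int) (ka : Int × Int) :
    PySem.Dict Int Int × PySem.Dict Int Int :=
  let ks := st.2.insert ka.1 (st.2.getD ka.1 0)
  let ks := ks.insert ka.2 (ks.getD ka.2 0)
  let fk := pvFind st.1 ka.1
  let fa := pvFind fk.2 ka.2
  if fk.1 ≠ fa.1 then ((fa.2.insert fa.1 fk.1), ks) else (fa.2, ks)

-- body of A's 'for tid in all_ids' loop (state: (parent, result, seen_absorb))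
def pvReconStep (acc : PySem.Dict Int Int × List (Int × Int) × PySem.Set Int) (tid : Int) :
    PySem.Dict Int Int × List (Int × Int) × PySem.Set Int :=
  let f := pvFind acc.1 tid
  if tid ≠ f.1 ∧ acc.2.2.contains tid = false then
    (f.2, acc.2.1 ++ [(f.1, tid)], acc.2.2.add tid)
  else (f.2, acc.2.1, acc.2.2)

def resolve_transitive_merges_py (pairs : List (Int × Int)) : List (Int × Int) :=
  let st := pairs.foldl pvStepA (PySem.Dict.empty, PySem.Dict.empty)
  let all_ids := pairs.foldl (fun s ka => PySem.Set.add (PySem.Set.add s ka.1) ka.2) PySem.Set.empty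
  let fin := all_ids.foldl pvReconStep (st.1, [], PySem.Set.empty)
  fin.2.1

-- ===== PORT B =====
-- body of B's pair loop: quick-find — record both roots, then relabel the whole map in one scan
def pvStepB (l : PySem.Dict Int Int) (ka : Int × Int) : PySem.Dict Int Int :=
  let rk := l.getD ka.1 ka.1
  let ra := l.getD ka.2 ka.2
  let l2 := (l.insert ka.1 rk).insert ka.2 ra
  if rk ≠ ra then
    PySem.Dict.mk (l2.items.map (fun yv => (yv.1, if yv.2 = ra then rk else yv.2)))
  else l2

def resolve_transitive_merges_py_alt (pairs : List (Int × Int)) : List (Int × Int) :=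
  let label := pairs.foldl pvStepB PySem.Dict.empty
  let all_ids := pairs.foldl (fun s ka => PySem.Set.add (PySem.Set.add s ka.1) ka.2) PySem.Set.empty
  (all_ids.filter (fun tid => label.getD tid tid != tid)).map (fun tid => (label.getD tid tid, tid))

-- ===== PRECONDITION & SPEC =====
def Spec_resolve_transitive_merges_py (pairs : List (Int × Int)) (out : List (Int × Int)) : Prop := out = resolve_transitive_merges_py_alt pairs
instance (pairs : List (Int × Int)) (out : List (Int × Int)) : Decidable (Spec_resolve_transitive_merges_py pairs out) := by unfold Spec_resolve_transitive_merges_py; infer_instance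

-- ===== CLAIM (what is proved, stated in full; the proofs are below) =====
def Claim_equal_resolve_transitive_merges_py : Prop := ∀ (pairs : List (Int × Int)), Dom_resolve_transitive_merges_py pairs → Spec_resolve_transitive_merges_py pairs (resolve_transitive_merges_py pairs)

-- ===== LEMMAS AND PROOFS =====

-- parent-pointer step: p.get(x, x)
def pvPget (p : PySem.Dict Int Int) (x : Int) : Int := p.getD x x

-- the chain from x reaches a fixpoint within n steps
def pvDistLe (p : PySem.Dict Int Int) (x : Int) (n : Nat) : Prop :=
  pvPget p ((pvPget p)^[n] x) = (pvPget p)^[n] x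

-- r is the root of x's chain
def pvIsRoot (p : PySem.Dict Int Int) (x r : Int) : Prop :=
  (∃ n, (pvPget p)^[n] x = r) ∧ pvPget p r = r

-- invariant of A's parent dict: no self-loops on keys, every chain reaches its root within size steps
def pvInvP (p : PySem.Dict Int Int) : Prop :=
  (∀ w, p.contains w = true → pvPget p w ≠ w) ∧ (∀ w, pvDistLe p w p.size)

-- B's map getD x x
def pvLget (l : PySem.Dict Int Int) (x : Int) : Int := l.getD x x

-- joint invariant: A's roots are exactly B's labels, and every label value is a key of the map
def pvLink (p l : PySem.Dict Int Int) : Prop :=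
  pvInvP p ∧ (∀ x, pvIsRoot p x (pvLget l x)) ∧ (∀ v ∈ l.values, l.contains v = true)

lemma pvPget_insert (p : PySem.Dict Int Int) (a b w : Int) :
    pvPget (p.insert a b) w = if w = a then b else pvPget p w := by
  simp [pvPget, PySem.Dict.getD_insert]

lemma pvDistLe_zero (p : PySem.Dict Int Int) {x : Int} (h : pvPget p x = x) : pvDistLe p x 0 := h

lemma pvDistLe_succ (p : PySem.Dict Int Int) {x : Int} {n : Nat} (h : pvDistLe p x n) :
    pvDistLe p x (n+1) := by
  unfold pvDistLe at *
  rw [Function.iterate_succ_apply', h, h]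

lemma pvDistLe_mono (p : PySem.Dict Int Int) {x : Int} {n m : Nat} (hnm : n ≤ m)
    (h : pvDistLe p x n) : pvDistLe p x m := by
  induction m with
  | zero => simpa [Nat.le_zero.mp hnm] using h
  | succ k ih =>
    rcases Nat.lt_or_ge n (k+1) with h1 | h1
    · exact pvDistLe_succ p (ih (Nat.lt_succ_iff.mp h1))
    · simpa [Nat.le_antisymm hnm h1] using h

lemma pvDistLe_step (p : PySem.Dict Int Int) {x : Int} {n : Nat} (h : pvDistLe p x (n+1)) :
    pvDistLe p (pvPget p x) n := by
  unfold pvDistLe at *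
  rwa [← Function.iterate_succ_apply]

lemma pvDistLe_of_step (p : PySem.Dict Int Int) {x v : Int} {n : Nat} (hv : pvPget p x = v)
    (h : pvDistLe p v n) : pvDistLe p x (n+1) := by
  unfold pvDistLe at *
  rwa [Function.iterate_succ_apply, hv]

lemma pvIsRoot_self (p : PySem.Dict Int Int) {x : Int} (h : pvPget p x = x) : pvIsRoot p x x :=
  ⟨⟨0, rfl⟩, h⟩

lemma pvIsRoot_fixed (p : PySem.Dict Int Int) {x r : Int} (hx : pvPget p x = x)
    (h : pvIsRoot p x r) : r = x := by
  obtain ⟨⟨n, hn⟩, _⟩ := h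
  rw [Function.iterate_fixed hx n] at hn
  exact hn.symm

lemma pvIsRoot_unique (p : PySem.Dict Int Int) {x r s : Int} (h1 : pvIsRoot p x r)
    (h2 : pvIsRoot p x s) : r = s := by
  obtain ⟨⟨n, hn⟩, hr⟩ := h1
  obtain ⟨⟨m, hm⟩, hs⟩ := h2
  rcases Nat.le_total n m with h | h
  · have : (pvPget p)^[m] x = r := by
      rw [← Nat.sub_add_cancel h, Function.iterate_add_apply, hn, Function.iterate_fixed hr]
    rw [this] at hm; exact hm.symm ▸ rfl
  · have : (pvPget p)^[n] x = s := by
      rw [← Nat.sub_add_cancel h, Function.iterate_add_apply, hm, Function.iterate_fixed hs]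
    rw [this] at hn; exact hn.symm ▸ rfl

lemma pvIsRoot_of_pget (p : PySem.Dict Int Int) {x v r : Int} (hv : pvPget p x = v)
    (h : pvIsRoot p v r) : pvIsRoot p x r := by
  obtain ⟨⟨n, hn⟩, hr⟩ := h
  exact ⟨⟨n+1, by rw [Function.iterate_succ_apply, hv, hn]⟩, hr⟩

lemma pvIsRoot_step (p : PySem.Dict Int Int) {x r : Int} (hx : pvPget p x ≠ x)
    (h : pvIsRoot p x r) : pvIsRoot p (pvPget p x) r := by
  obtain ⟨⟨n, hn⟩, hr⟩ := h
  cases n with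
  | zero =>
    simp only [Function.iterate_zero, id_eq] at hn
    subst hn
    exact absurd hr hx
  | succ m =>
    exact ⟨⟨m, by rwa [Function.iterate_succ_apply] at hn⟩, hr⟩

lemma pvDistLe_root (p : PySem.Dict Int Int) {x : Int} {n : Nat} (h : pvDistLe p x n) :
    pvIsRoot p x ((pvPget p)^[n] x) := ⟨⟨n, rfl⟩, h⟩

-- a chain that terminates has no 2-cycle at its start
lemma pvNoTwoCycle (p : PySem.Dict Int Int) {x : Int} {n : Nat} (hd : pvDistLe p x n)
    (hx : pvPget p x ≠ x) : pvPget p (pvPget p x) ≠ x := by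
  intro h2
  have key : ∀ k, (pvPget p)^[2*k] x = x := by
    intro k
    induction k with
    | zero => rfl
    | succ j ih =>
      have : 2*(j+1) = (2*j) + 1 + 1 := by omega
      rw [this, Function.iterate_succ_apply', Function.iterate_succ_apply', ih, h2]
  unfold pvDistLe at hd
  rcases Nat.even_or_odd n with ⟨k, hk⟩ | ⟨k, hk⟩
  · have hit : (pvPget p)^[n] x = x := by rw [hk, ← two_mul, key]
    rw [hit] at hd; exact hx hd
  · have hit : (pvPget p)^[n] x = pvPget p x := by
      rw [hk, show 2*k+1 = 1 + 2*k by omega, Function.iterate_add_apply, key]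
      rfl
    rw [hit, h2] at hd
    exact hx hd.symm

lemma pvDistLe_two_step (p : PySem.Dict Int Int) {x : Int} {n : Nat}
    (h : pvDistLe p x (n+1)) :
    pvDistLe p (pvPget p (pvPget p x)) n := by
  have hy := pvDistLe_step p h
  by_cases hyf : pvPget p (pvPget p x) = pvPget p x
  · rw [hyf]; exact hy
  · cases n with
    | zero => exact absurd hy hyf
    | succ m => exact pvDistLe_mono p (Nat.le_succ m) (pvDistLe_step p hy)

-- contains from a nontrivial parent pointer
lemma pvContains_of_pget_ne (p : PySem.Dict Int Int) {x : Int} (hx : pvPget p x ≠ x) :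
    p.contains x = true := by
  by_contra h
  exact hx (by simp [pvPget, PySem.Dict.getD_of_not_contains p x (by simpa using h)])

-- ==== the path-halving insert p[x] := p[p[x]] preserves dist bounds and roots ====
lemma pvHalf_main (p : PySem.Dict Int Int) (x : Int) (hx : pvPget p x ≠ x)
    (hz : pvPget p (pvPget p x) ≠ x) :
    ∀ m w, pvDistLe p w m → ∀ r, pvIsRoot p w r →
      pvDistLe (p.insert x (pvPget p (pvPget p x))) w m ∧
      pvIsRoot (p.insert x (pvPget p (pvPget p x))) w r := by
  intro m
  induction m using Nat.strong_induction_on with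
  | _ m ih =>
    intro w hdw r hrw
    set z := pvPget p (pvPget p x) with hzdef
    set p' := p.insert x z with hp'
    have hget : ∀ u, pvPget p' u = if u = x then z else pvPget p u := fun u => pvPget_insert p x z u
    by_cases hw : pvPget p w = w
    · have hwx : w ≠ x := fun h => hx (h ▸ hw)
      have hfix' : pvPget p' w = w := by rw [hget, if_neg hwx]; exact hw
      have hr := pvIsRoot_fixed p hw hrw
      subst hr
      exact ⟨pvDistLe_mono p' (Nat.zero_le m) (pvDistLe_zero p' hfix'), pvIsRoot_self p' hfix'⟩
    · cases m with
      | zero => exact absurd hdw hw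
      | succ n =>
        by_cases hwx : w = x
        · subst hwx
          have hdz : pvDistLe p z n := pvDistLe_two_step p hdw
          have hrz : pvIsRoot p z r := by
            have hy := pvIsRoot_step p hw hrw
            by_cases hyf : pvPget p (pvPget p w) = pvPget p w
            · rw [hzdef, hyf]; exact hy
            · rw [hzdef]; exact pvIsRoot_step p hyf hy
          obtain ⟨hd', hr'⟩ := ih n (Nat.lt_succ_self n) z hdz r hrz
          have hstep : pvPget p' w = z := by rw [hget]; simp
          exact ⟨pvDistLe_of_step p' hstep hd', pvIsRoot_of_pget p' hstep hr'⟩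
        · have hstep : pvPget p' w = pvPget p w := by rw [hget, if_neg hwx]
          have hdv : pvDistLe p (pvPget p w) n := pvDistLe_step p hdw
          have hrv : pvIsRoot p (pvPget p w) r := pvIsRoot_step p hw hrw
          obtain ⟨hd', hr'⟩ := ih n (Nat.lt_succ_self n) _ hdv r hrv
          exact ⟨pvDistLe_of_step p' hstep hd', pvIsRoot_of_pget p' hstep hr'⟩

lemma pvHalf_fix (p : PySem.Dict Int Int) (x : Int) (hx : pvPget p x ≠ x)
    (hz : pvPget p (pvPget p x) ≠ x) (w : Int) :
    pvPget (p.insert x (pvPget p (pvPget p x))) w = w ↔ pvPget p w = w := by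
  rw [pvPget_insert]
  by_cases hwx : w = x
  · subst hwx; simp [hz, hx]
  · simp [hwx]

lemma pvHalf_root_iff (p : PySem.Dict Int Int) (x : Int) (hx : pvPget p x ≠ x)
    (hz : pvPget p (pvPget p x) ≠ x) (hA2 : ∀ w, pvDistLe p w p.size) (w r : Int) :
    pvIsRoot (p.insert x (pvPget p (pvPget p x))) w r ↔ pvIsRoot p w r := by
  constructor
  · intro h
    have hd := hA2 w
    have h0 := pvDistLe_root p hd
    have h1 := (pvHalf_main p x hx hz _ w hd _ h0).2
    have := pvIsRoot_unique _ h h1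
    rwa [this]
  · intro h
    exact (pvHalf_main p x hx hz _ w (hA2 w) r h).2

-- ==== specification of find (the while loop with path halving) ====
lemma pvFindS_spec : ∀ n p x fuel, pvDistLe p x n → n < fuel → pvInvP p →
    pvIsRoot p x (pvFindS p x fuel).1 ∧ pvInvP (pvFindS p x fuel).2 ∧
    (pvFindS p x fuel).2.size = p.size ∧
    (∀ w, pvPget (pvFindS p x fuel).2 w = w ↔ pvPget p w = w) ∧
    (∀ w r, pvIsRoot (pvFindS p x fuel).2 w r ↔ pvIsRoot p w r) := by
  intro n
  induction n using Nat.strong_induction_on with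
  | _ n ih =>
    intro p x fuel hd hfuel hinv
    cases fuel with
    | zero => omega
    | succ f =>
      by_cases hx : pvPget p x = x
      · have hstep : pvFindS p x (f+1) = (x, p) := by
          simp only [pvFindS]
          rw [if_neg (show ¬ p.getD x x ≠ x by simpa [pvPget] using hx)]
        rw [hstep]
        exact ⟨pvIsRoot_self p hx, hinv, rfl, fun _ => Iff.rfl, fun _ _ => Iff.rfl⟩
      · have hxne : ¬ (p.getD x x = x) := by simpa [pvPget] using hx
        have hz : pvPget p (pvPget p x) ≠ x := pvNoTwoCycle p hd hx
        have hunf : pvFindS p x (f+1) =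
            pvFindS (p.insert x (pvPget p (pvPget p x))) (pvPget p (pvPget p x)) f := by
          simp only [pvFindS, ne_eq, hxne, not_false_iff, if_pos]
          rfl
        set z := pvPget p (pvPget p x) with hzdef
        set p' := p.insert x z with hp'
        have hcx : p.contains x = true := pvContains_of_pget_ne p hx
        have hsize : p'.size = p.size := by
          rw [hp', PySem.Dict.size_insert, if_pos hcx]
        have hfix := pvHalf_fix p x hx hz
        have hA2 := hinv.2
        have hinv' : pvInvP p' := by
          constructor
          · intro w hw
            rw [hp', PySem.Dict.contains_insert] at hw
            rcases Bool.or_eq_true_iff.mp hw with h | h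
            · have : w = x := by simpa using h
              subst this
              rw [pvPget_insert, if_pos rfl]; exact hz
            · intro hfw
              exact hinv.1 w h ((hfix w).mp hfw)
          · intro w
            rw [hsize]
            exact (pvHalf_main p x hx hz _ w (hA2 w) _ (pvDistLe_root p (hA2 w))).1
        cases n with
        | zero => exact absurd hd hx
        | succ m =>
          have hdz : pvDistLe p z m := pvDistLe_two_step p hd
          have hdz' : pvDistLe p' z m :=
            (pvHalf_main p x hx hz m z hdz _ (pvDistLe_root p hdz)).1
          have hrec := ih m (Nat.lt_succ_self m) p' z f hdz' (by omega) hinv'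
          rw [hunf]
          refine ⟨?_, hrec.2.1, by rw [hrec.2.2.1, hsize], ?_, ?_⟩
          · -- root of x in p is the returned value
            have h1 : pvIsRoot p' z (pvFindS p' z f).1 := hrec.1
            have h2 : pvIsRoot p' x (pvFindS p' z f).1 :=
              pvIsRoot_of_pget p' (by rw [pvPget_insert, if_pos rfl]) h1
            exact (pvHalf_root_iff p x hx hz hA2 x _).mp h2
          · intro w
            rw [hrec.2.2.2.1 w]
            exact hfix w
          · intro w r
            rw [hrec.2.2.2.2 w r]
            exact pvHalf_root_iff p x hx hz hA2 w r

lemma pvFind_spec (p : PySem.Dict Int Int) (x : Int) (hinv : pvInvP p) :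
    pvIsRoot p x (pvFind p x).1 ∧ pvInvP (pvFind p x).2 ∧
    (pvFind p x).2.size = p.size ∧
    (∀ w, pvPget (pvFind p x).2 w = w ↔ pvPget p w = w) ∧
    (∀ w r, pvIsRoot (pvFind p x).2 w r ↔ pvIsRoot p w r) :=
  pvFindS_spec p.size p x (p.size + 1) (hinv.2 x) (Nat.lt_succ_self _) hinv

-- ==== the union insert parent[ra] := rk ====
lemma pvUnion_dist (p : PySem.Dict Int Int) (ra rk : Int) (hra : pvPget p ra = ra)
    (hrk : pvPget p rk = rk) (hne : rk ≠ ra) :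
    ∀ m w, pvDistLe p w m → pvDistLe (p.insert ra rk) w (m+1) := by
  intro m
  induction m using Nat.strong_induction_on with
  | _ m ih =>
    intro w hdw
    set p' := p.insert ra rk with hp'
    by_cases hw : pvPget p w = w
    · by_cases hwa : w = ra
      · subst hwa
        have h1 : pvPget p' w = rk := by rw [pvPget_insert, if_pos rfl]
        have h2 : pvPget p' rk = rk := by rw [pvPget_insert, if_neg hne]; exact hrk
        exact pvDistLe_mono p' (by omega) (pvDistLe_of_step p' h1 (pvDistLe_zero p' h2))
      · have : pvPget p' w = w := by rw [pvPget_insert, if_neg hwa]; exact hw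
        exact pvDistLe_mono p' (Nat.zero_le _) (pvDistLe_zero p' this)
    · cases m with
      | zero => exact absurd hdw hw
      | succ k =>
        have hwa : w ≠ ra := fun h => hw (h ▸ hra)
        have hstep : pvPget p' w = pvPget p w := by rw [pvPget_insert, if_neg hwa]
        exact pvDistLe_of_step p' hstep (ih k (Nat.lt_succ_self k) _ (pvDistLe_step p hdw))

lemma pvUnion_root (p : PySem.Dict Int Int) (ra rk : Int) (hra : pvPget p ra = ra)
    (hrk : pvPget p rk = rk) (hne : rk ≠ ra) :
    ∀ m w, pvDistLe p w m → ∀ s, pvIsRoot p w s →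
      pvIsRoot (p.insert ra rk) w (if s = ra then rk else s) := by
  intro m
  induction m using Nat.strong_induction_on with
  | _ m ih =>
    intro w hdw s hrw
    set p' := p.insert ra rk with hp'
    by_cases hw : pvPget p w = w
    · have hs := pvIsRoot_fixed p hw hrw
      rw [hs]
      by_cases hwa : w = ra
      · rw [if_pos hwa]
        have h1 : pvPget p' w = rk := by rw [pvPget_insert, if_pos hwa]
        have h2 : pvPget p' rk = rk := by rw [pvPget_insert, if_neg hne]; exact hrk
        exact pvIsRoot_of_pget p' h1 (pvIsRoot_self p' h2)
      · rw [if_neg hwa]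
        exact pvIsRoot_self p' (by rw [pvPget_insert, if_neg hwa]; exact hw)
    · cases m with
      | zero => exact absurd hdw hw
      | succ k =>
        have hwa : w ≠ ra := fun h => hw (h ▸ hra)
        have hstep : pvPget p' w = pvPget p w := by rw [pvPget_insert, if_neg hwa]
        exact pvIsRoot_of_pget p' hstep
          (ih k (Nat.lt_succ_self k) _ (pvDistLe_step p hdw) s (pvIsRoot_step p hw hrw))

lemma pvUnion_inv (p : PySem.Dict Int Int) (ra rk : Int) (hinv : pvInvP p)
    (hra : pvPget p ra = ra) (hrk : pvPget p rk = rk) (hne : rk ≠ ra) :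
    pvInvP (p.insert ra rk) ∧ (p.insert ra rk).size = p.size + 1 := by
  have hca : p.contains ra = false := by
    by_contra h
    exact hinv.1 ra (by simpa using h) hra
  have hsize : (p.insert ra rk).size = p.size + 1 := by
    rw [PySem.Dict.size_insert, if_neg (by simp [hca])]
  refine ⟨⟨?_, ?_⟩, hsize⟩
  · intro w hw
    rw [PySem.Dict.contains_insert] at hw
    rcases Bool.or_eq_true_iff.mp hw with h | h
    · have : w = ra := by simpa using h
      subst this
      rw [pvPget_insert, if_pos rfl]; exact hne
    · rw [pvPget_insert]
      by_cases hwa : w = ra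
      · subst hwa; rw [if_pos rfl]; exact hne
      · rw [if_neg hwa]; exact hinv.1 w h
  · intro w
    rw [hsize]
    exact pvUnion_dist p ra rk hra hrk hne p.size w (hinv.2 w)

-- ==== B-side dict facts ====
lemma pvGet?_mk_map_val (g : Int → Int) (k : Int) :
    ∀ its : List (Int × Int),
      (PySem.Dict.mk (its.map (fun yv => (yv.1, g yv.2)))).get? k = ((PySem.Dict.mk its).get? k).map g := by
  intro its
  induction its with
  | nil => rfl
  | cons hd tl ih =>
    obtain ⟨k1, v1⟩ := hd
    simp only [List.map_cons, PySem.Dict.get?_mk_cons]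
    split_ifs with h
    · rfl
    · exact ih

lemma pvLget_value_mem (l : PySem.Dict Int Int) (x : Int) :
    pvLget l x = x ∨ pvLget l x ∈ l.values := by
  cases h : l.get? x with
  | none => left; rw [pvLget, PySem.Dict.getD_eq_get?_getD, h]; rfl
  | some v =>
    right
    rw [pvLget, PySem.Dict.getD_eq_get?_getD, h]
    have := PySem.Dict.mem_items_of_get?_eq_some l h
    simpa [PySem.Dict.values] using List.mem_map_of_mem (f := fun p => p.2) this

lemma pvLget_of_not_contains (l : PySem.Dict Int Int) {x : Int} (h : l.contains x = false) :
    pvLget l x = x := by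
  rw [pvLget, PySem.Dict.getD_of_not_contains l x h]

-- the relabel scan: getD of the mapped dict
lemma pvRelabel_lget (l : PySem.Dict Int Int) (ra rk : Int) (hra : l.contains ra = true) (x : Int) :
    pvLget (PySem.Dict.mk (l.items.map (fun yv => (yv.1, if yv.2 = ra then rk else yv.2)))) x =
      (if pvLget l x = ra then rk else pvLget l x) := by
  have hmap := pvGet?_mk_map_val (fun v => if v = ra then rk else v) x l.items
  have hl : PySem.Dict.mk l.items = l := rfl
  rw [hl] at hmap
  rw [pvLget, PySem.Dict.getD_eq_get?_getD, hmap]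
  cases h : l.get? x with
  | none =>
    have hcx : l.contains x = false := by
      rw [PySem.Dict.contains_eq_isSome_get?, h]; rfl
    have hx : pvLget l x = x := pvLget_of_not_contains l hcx
    have hxa : x ≠ ra := fun he => by rw [he, hra] at hcx; cases hcx
    rw [hx, if_neg hxa]
    rfl
  | some v =>
    have : pvLget l x = v := by rw [pvLget, PySem.Dict.getD_eq_get?_getD, h]; rfl
    rw [this]
    rfl

lemma pvRelabel_contains (l : PySem.Dict Int Int) (g : Int → Int) (x : Int) :
    (PySem.Dict.mk (l.items.map (fun yv => (yv.1, g yv.2)))).contains x = l.contains x := by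
  rw [PySem.Dict.contains_eq_isSome_get?, PySem.Dict.contains_eq_isSome_get?]
  have := pvGet?_mk_map_val g x l.items
  have hl : PySem.Dict.mk l.items = l := rfl
  rw [hl] at this
  rw [this]
  cases l.get? x <;> rfl

lemma pvRelabel_values (l : PySem.Dict Int Int) (g : Int → Int) {v : Int}
    (h : v ∈ (PySem.Dict.mk (l.items.map (fun yv => (yv.1, g yv.2)))).values) :
    ∃ w ∈ l.values, v = g w := by
  rw [PySem.Dict.values_mk, List.map_map] at h
  obtain ⟨yv, hyv, hv⟩ := List.mem_map.mp h
  exact ⟨yv.2, by simpa [PySem.Dict.values] using List.mem_map_of_mem (f := fun p => p.2) hyv, hv.symm⟩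

-- lget after the two inserts of B's loop body is unchanged
lemma pvLget_insert2 (l : PySem.Dict Int Int) (k a : Int) (x : Int) :
    pvLget ((l.insert k (pvLget l k)).insert a (pvLget l a)) x = pvLget l x := by
  simp only [pvLget, PySem.Dict.getD_insert]
  split_ifs with h1 h2
  · rw [h1]
  · rw [h2]
  · rfl

lemma pvContains_insert2 (l : PySem.Dict Int Int) (k a v x : Int) (hx : l.contains x = true) :
    ((l.insert k v).insert a (pvLget l a)).contains x = true := by
  simp [PySem.Dict.contains_insert, hx]

-- ==== the main loop preserves the joint invariant ====
lemma pvStep_link (p l : PySem.Dict Int Int) (ks : PySem.Dict Int Int) (ka : Int × Int)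
    (h : pvLink p l) : pvLink (pvStepA (p, ks) ka).1 (pvStepB l ka) := by
  obtain ⟨hinv, hL1, hL2⟩ := h
  obtain ⟨k, a⟩ := ka
  -- A side: the two finds
  have hf1 := pvFind_spec p k hinv
  set f1 := pvFind p k with hf1def
  have hf2 := pvFind_spec f1.2 a hf1.2.1
  set f2 := pvFind f1.2 a with hf2def
  -- roots equal labels
  have hrk : f1.1 = l.getD k k := pvIsRoot_unique p hf1.1 (hL1 k)
  have hL1p1 : ∀ x, pvIsRoot f1.2 x (pvLget l x) := fun x => (hf1.2.2.2.2 x _).mpr (hL1 x)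
  have hra : f2.1 = l.getD a a := pvIsRoot_unique f1.2 hf2.1 (hL1p1 a)
  have hL1p2 : ∀ x, pvIsRoot f2.2 x (pvLget l x) := fun x => (hf2.2.2.2.2 x _).mpr (hL1p1 x)
  -- B side common part
  set rk := l.getD k k with hrkdef
  set ra := l.getD a a with hradef
  set l2 := (l.insert k rk).insert a ra with hl2def
  have hl2get : ∀ x, pvLget l2 x = pvLget l x := pvLget_insert2 l k a
  have hl2cmono : ∀ x, l.contains x = true → l2.contains x = true := by
    intro x hx
    exact pvContains_insert2 l k a rk x hx
  have hl2ck : l2.contains rk = true := by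
    rcases pvLget_value_mem l k with h | h
    · have hk2 : rk = k := h
      rw [hk2, hl2def]
      simp [PySem.Dict.contains_insert]
    · exact hl2cmono rk (hL2 rk h)
  have hl2ca : l2.contains ra = true := by
    rcases pvLget_value_mem l a with h | h
    · have ha2 : ra = a := h
      rw [ha2, hl2def]
      simp
    · exact hl2cmono ra (hL2 ra h)
  have hl2vals : ∀ v ∈ l2.values, l2.contains v = true := by
    intro v hv
    rcases PySem.Dict.mem_values_insert _ _ _ _ hv with h | h
    · rw [h]; exact hl2ca
    · rcases PySem.Dict.mem_values_insert _ _ _ _ h with h' | h'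
      · rw [h']; exact hl2ck
      · exact hl2cmono v (hL2 v h')
  -- unfold the two step functions
  by_cases hne : rk ≠ ra
  · have hca : f1.1 ≠ f2.1 := by rw [hrk, hra]; exact hne
    have hA : (pvStepA (p, ks) (k, a)).1 = f2.2.insert f2.1 f1.1 := by
      simp only [pvStepA]
      rw [← hf1def, ← hf2def, if_pos hca]
    have hB : pvStepB l (k, a) = PySem.Dict.mk (l2.items.map (fun yv => (yv.1, if yv.2 = ra then rk else yv.2))) := by
      simp only [pvStepB]
      rw [← hrkdef, ← hradef, ← hl2def, if_pos hne]
    rw [hA, hB]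
    -- the union branch
    have hfra : pvPget f2.2 ra = ra := (hL1p2 a).2
    have hfrk : pvPget f2.2 rk = rk := by
      have := hL1p2 k
      exact this.2
    obtain ⟨hinv3, _⟩ := pvUnion_inv f2.2 ra rk hf2.2.1 hfra hfrk hne
    refine ⟨by simpa [hrk, hra] using hinv3, ?_, ?_⟩
    · intro x
      have hroot := pvUnion_root f2.2 ra rk hfra hfrk hne f2.2.size x (hf2.2.1.2 x)
        (pvLget l x) (hL1p2 x)
      rw [pvRelabel_lget l2 ra rk hl2ca x, hl2get x]
      simpa [hrk, hra] using hroot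
    · intro v hv
      obtain ⟨w, hw, hvw⟩ := pvRelabel_values l2 (fun v => if v = ra then rk else v) hv
      rw [pvRelabel_contains l2 (fun v => if v = ra then rk else v) v]
      rw [hvw]
      by_cases hwa : w = ra
      · simp only [hwa]; exact hl2ck
      · rw [if_neg hwa]; exact hl2vals w hw
  · have hca : ¬ f1.1 ≠ f2.1 := by rw [hrk, hra]; exact hne
    have hA : (pvStepA (p, ks) (k, a)).1 = f2.2 := by
      simp only [pvStepA]
      rw [← hf1def, ← hf2def, if_neg hca]
    have hB : pvStepB l (k, a) = l2 := by
      simp only [pvStepB]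
      rw [← hrkdef, ← hradef, ← hl2def, if_neg hne]
    rw [hA, hB]
    refine ⟨hf2.2.1, ?_, hl2vals⟩
    intro x
    rw [hl2get x]
    exact hL1p2 x

lemma pvFold_link : ∀ (pairs : List (Int × Int)) (p ks l : PySem.Dict Int Int), pvLink p l →
    pvLink (pairs.foldl pvStepA (p, ks)).1 (pairs.foldl pvStepB l) := by
  intro pairs
  induction pairs with
  | nil => intro p ks l h; exact h
  | cons ka rest ih =>
    intro p ks l h
    have hstep := pvStep_link p l ks ka h
    simpa using ih (pvStepA (p, ks) ka).1 (pvStepA (p, ks) ka).2 (pvStepB l ka)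
      (by simpa using hstep)

-- the id set A and B both build is duplicate-free
lemma pvAllIds_nodup : ∀ (pairs : List (Int × Int)) (s : PySem.Set Int), s.Nodup →
    (pairs.foldl (fun s ka => PySem.Set.add (PySem.Set.add s ka.1) ka.2) s).Nodup := by
  intro pairs
  induction pairs with
  | nil => intro s h; exact h
  | cons ka rest ih =>
    intro s h
    exact ih _ (PySem.Set.nodup_add _ _ (PySem.Set.nodup_add _ _ h))

lemma pvSet_contains_iff (s : PySem.Set Int) (x : Int) : s.contains x = true ↔ x ∈ s := by
  constructor
  · intro h; exact List.mem_of_elem_eq_true h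
  · intro h; exact List.elem_eq_true_of_mem h

lemma pvSet_mem_add (s : PySem.Set Int) (x y : Int) : y ∈ s.add x ↔ y ∈ s ∨ y = x :=
  PySem.Set.mem_add s x y

-- ==== the reconstruction loop produces B's filtered map ====
lemma pvRecon (l : PySem.Dict Int Int) :
    ∀ (ids : List Int) (p : PySem.Dict Int Int) (res : List (Int × Int)) (seen : PySem.Set Int),
      pvInvP p → (∀ x, pvIsRoot p x (pvLget l x)) → (∀ t ∈ ids, t ∉ seen) → ids.Nodup →
      (ids.foldl pvReconStep (p, res, seen)).2.1 =
        res ++ (ids.filter (fun tid => l.getD tid tid != tid)).map (fun tid => (l.getD tid tid, tid)) := by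
  intro ids
  induction ids with
  | nil => intro p res seen _ _ _ _; simp
  | cons t rest ih =>
    intro p res seen hinv hL1 hseen hnd
    have hf := pvFind_spec p t hinv
    set f := pvFind p t with hfdef
    have hroot : f.1 = pvLget l t := pvIsRoot_unique p hf.1 (hL1 t)
    have hL1' : ∀ x, pvIsRoot f.2 x (pvLget l x) := fun x => (hf.2.2.2.2 x _).mpr (hL1 x)
    have hsc : seen.contains t = false := by
      rw [Bool.eq_false_iff]
      intro h
      exact hseen t (List.mem_cons_self) ((pvSet_contains_iff seen t).mp h)
    have hstep : pvReconStep (p, res, seen) t =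
        if t ≠ f.1 ∧ seen.contains t = false then (f.2, res ++ [(f.1, t)], seen.add t)
        else (f.2, res, seen) := rfl
    by_cases hne : t ≠ f.1
    · have hcond : t ≠ f.1 ∧ seen.contains t = false := ⟨hne, hsc⟩
      rw [List.foldl_cons, hstep, if_pos hcond]
      have hseen' : ∀ u ∈ rest, u ∉ seen.add t := by
        intro u hu hmem
        rcases (pvSet_mem_add seen t u).mp hmem with h | h
        · exact hseen u (List.mem_cons_of_mem t hu) h
        · exact (List.nodup_cons.mp hnd).1 (h ▸ hu)
      rw [ih f.2 (res ++ [(f.1, t)]) (seen.add t) hf.2.1 hL1' hseen' (List.nodup_cons.mp hnd).2]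
      have hfilter : (l.getD t t != t) = true := by
        rw [bne_iff_ne]
        rw [hroot] at hne
        exact fun h => hne (by rw [pvLget, h])
      rw [List.filter_cons, if_pos hfilter]
      simp [hroot, pvLget]
    · have hcond : ¬ (t ≠ f.1 ∧ seen.contains t = false) := fun h => hne h.1
      rw [List.foldl_cons, hstep, if_neg hcond]
      rw [ih f.2 res seen hf.2.1 hL1' (fun u hu => hseen u (List.mem_cons_of_mem t hu))
        (List.nodup_cons.mp hnd).2]
      have ht : t = f.1 := not_ne_iff.mp hne
      have hfilter : (l.getD t t != t) = false := by
        have hgt : l.getD t t = t := by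
          rw [show l.getD t t = pvLget l t from rfl, ← hroot, ← ht]
        simp [hgt]
      rw [List.filter_cons, if_neg (by simp [hfilter])]

lemma pvLink_empty : pvLink PySem.Dict.empty PySem.Dict.empty := by
  refine ⟨⟨?_, ?_⟩, ?_, ?_⟩
  · intro w hw
    rw [PySem.Dict.contains_empty] at hw
    cases hw
  · intro w
    exact pvDistLe_zero _ (by simp [pvPget, PySem.Dict.getD_empty])
  · intro x
    exact pvIsRoot_self _ (by simp [pvPget, PySem.Dict.getD_empty])
  · intro v hv
    simp [PySem.Dict.values, PySem.Dict.empty] at hv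

-- ===== VERDICT (by name: the statement is the Claim_ definition above) =====
theorem resolve_transitive_merges_py_spec : Claim_equal_resolve_transitive_merges_py := by
  unfold Claim_equal_resolve_transitive_merges_py
  intro pairs _
  unfold Spec_resolve_transitive_merges_py
  unfold resolve_transitive_merges_py resolve_transitive_merges_py_alt
  have hlink := pvFold_link pairs PySem.Dict.empty PySem.Dict.empty PySem.Dict.empty pvLink_empty
  set st := pairs.foldl pvStepA (PySem.Dict.empty, PySem.Dict.empty) with hst
  set label := pairs.foldl pvStepB PySem.Dict.empty with hlabel
  set all_ids := pairs.foldl (fun s ka => PySem.Set.add (PySem.Set.add s ka.1) ka.2) PySem.Set.empty with hids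
  have hnd : all_ids.Nodup := pvAllIds_nodup pairs PySem.Set.empty List.nodup_nil
  have := pvRecon label all_ids st.1 [] PySem.Set.empty hlink.1 hlink.2.1
    (fun t _ h => by cases h) hnd
  simpa using this
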